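-- pv_equiv track=rewrite | github.com/RamenDR/ramen | test/drenv/stress/failures.py | _detect_indent
-- ===== SOURCE A (Python) =====
-- def _detect_indent(lines):
--     """
--     Detect the indentation level for the trim marker.
--
--     Look for "File" lines in tracebacks to align with them, otherwise
--     use the minimum non-zero indentation.
--     """
--     for line in lines:
--         stripped = line.lstrip()
--         if stripped.startswith('File "'):
--             spaces = len(line) - len(stripped)
--             return " " * spaces
--
--     min_indent = None
--     for line in lines:
--         if not line.strip():
--             continue
--
--         spaces = len(line) - len(line.lstrip())
--         if spaces > 0:
--             if min_indent is None or spaces < min_indent: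
--                 min_indent = spaces
--
--     return " " * (min_indent if min_indent else 6)
-- ===== SOURCE B (Python) =====
-- def _detect_indent(lines):
--     """Single fused pass: return at the first 'File \"' line, otherwise keep a
--     running minimum positive indent (0 = unset) and finish with it (or 6)."""
--     min_indent = 0
--     for line in lines:
--         stripped = line.lstrip()
--         if stripped.startswith('File "'):
--             return " " * (len(line) - len(stripped))
--         if stripped:
--             spaces = len(line) - len(stripped)
--             if spaces > 0 and (min_indent == 0 or spaces < min_indent):
--                 min_indent = spaces
--     return " " * (min_indent or 6)
-- ===== Notes on version B (the rewrite author's own statement) =====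
-- stated objective: simpler
-- what changed: Fuses A's two sequential scans (find a File-line, then find the minimum positive indent) into one pass that returns early at a File-line and otherwise maintains a running minimum with a 0 sentinel instead of None.
import Mathlib
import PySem

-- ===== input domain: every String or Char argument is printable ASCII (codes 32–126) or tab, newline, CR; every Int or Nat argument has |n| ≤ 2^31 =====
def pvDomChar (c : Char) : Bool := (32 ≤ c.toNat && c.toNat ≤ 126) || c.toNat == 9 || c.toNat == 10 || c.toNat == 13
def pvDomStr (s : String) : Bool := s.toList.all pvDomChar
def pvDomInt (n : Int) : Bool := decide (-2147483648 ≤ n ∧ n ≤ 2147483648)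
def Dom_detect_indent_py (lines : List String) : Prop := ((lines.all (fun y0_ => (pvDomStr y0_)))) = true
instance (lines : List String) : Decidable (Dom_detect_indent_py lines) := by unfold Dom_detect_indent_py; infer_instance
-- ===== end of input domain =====

-- B fuses A's two sequential scans into one early-returning pass with a 0 sentinel (objective: simpler; same cost).

-- " " * n  (exact: Python yields "" for n ≤ 0, and Int.toNat clamps negatives to 0)
def pvSpacesStr (n : Int) : String := String.ofList (List.replicate n.toNat ' ')

-- ===== PORT A =====
-- A's first loop: the prefix of the first line whose lstrip starts with 'File "'
def pvFileA : List String → Option String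
  | [] => none
  | line :: rest =>
    if PySem.Str.startswith (PySem.Str.lstrip line) "File \"" then
      some (pvSpacesStr (PySem.Str.len line - PySem.Str.len (PySem.Str.lstrip line)))
    else pvFileA rest

-- A's second loop body: running minimum positive indent (none = min_indent is None)
def pvMinA (mi : Option Int) (line : String) : Option Int :=
  if PySem.Str.strip line = "" then mi
  else
    if 0 < PySem.Str.len line - PySem.Str.len (PySem.Str.lstrip line) then
      match mi with
      | none => some (PySem.Str.len line - PySem.Str.len (PySem.Str.lstrip line))
      | some m => if PySem.Str.len line - PySem.Str.len (PySem.Str.lstrip line) < m then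
            some (PySem.Str.len line - PySem.Str.len (PySem.Str.lstrip line)) else some m
    else mi

def detect_indent_py (lines : List String) : String :=
  match pvFileA lines with
  | some s => s
  | none =>
    -- " " * (min_indent if min_indent else 6)
    match lines.foldl pvMinA none with
    | none => pvSpacesStr 6
    | some m => if m = 0 then pvSpacesStr 6 else pvSpacesStr m

-- ===== PORT B =====
-- Source B's single loop: early return at a 'File "' line, else update min_indent (0 = unset)
def pvB : List String → Int → String
  | [], mi => pvSpacesStr (if mi = 0 then 6 else mi)   -- " " * (min_indent or 6)
  | line :: rest, mi =>
    if PySem.Str.startswith (PySem.Str.lstrip line) "File \"" then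
      pvSpacesStr (PySem.Str.len line - PySem.Str.len (PySem.Str.lstrip line))
    else
      pvB rest
        (if PySem.Str.lstrip line ≠ "" then
           if 0 < PySem.Str.len line - PySem.Str.len (PySem.Str.lstrip line) ∧
              (mi = 0 ∨ PySem.Str.len line - PySem.Str.len (PySem.Str.lstrip line) < mi) then
             PySem.Str.len line - PySem.Str.len (PySem.Str.lstrip line)
           else mi
         else mi)

def detect_indent_py_alt (lines : List String) : String := pvB lines 0

-- ===== PRECONDITION & SPEC =====
def Spec_detect_indent_py (lines : List String) (out : String) : Prop := out = detect_indent_py_alt lines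
instance (lines : List String) (out : String) : Decidable (Spec_detect_indent_py lines out) := by unfold Spec_detect_indent_py; infer_instance

-- ===== CLAIM (what is proved, stated in full; the proofs are below) =====
def Claim_equal_detect_indent_py : Prop := ∀ (lines : List String), Dom_detect_indent_py lines → Spec_detect_indent_py lines (detect_indent_py lines)

-- ===== LEMMAS AND PROOFS =====

-- the finishing step of A's second phase, as a function of the final accumulator
def pvFinish : Option Int → String
  | none => pvSpacesStr 6
  | some m => if m = 0 then pvSpacesStr 6 else pvSpacesStr m

-- line.strip() is empty exactly when line.lstrip() is (both mean: all-whitespace line)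
lemma strip_empty_iff (s : String) :
    PySem.Str.strip s = "" ↔ PySem.Str.lstrip s = "" := by
  rw [← String.toList_eq_nil_iff, ← String.toList_eq_nil_iff,
      PySem.Str.toList_strip, PySem.Str.toList_lstrip]
  unfold PySem.Chars.strip PySem.Chars.rstrip PySem.Chars.lstrip
  constructor
  · intro h
    rcases hd : List.dropWhile PySem.Chars.isspace s.toList with _ | ⟨c, cs⟩
    · rfl
    · exfalso
      rw [List.reverse_eq_nil_iff, List.dropWhile_eq_nil_iff] at h
      have hc : PySem.Chars.isspace c = false := by
        have := List.head_dropWhile_not PySem.Chars.isspace (l := s.toList) (by rw [hd]; simp)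
        simpa [hd] using this
      have : PySem.Chars.isspace c = true := by apply h; rw [hd]; simp
      simp [hc] at this
  · intro h; rw [h]; rfl

-- B's per-line accumulator update is A's (pvMinA) through the 0-sentinel encoding,
-- and A's accumulator only ever holds positive values
lemma pvStep (mi : Option Int) (hmi : ∀ v, mi = some v → 0 < v) (line : String) :
    (if PySem.Str.lstrip line ≠ "" then
       if 0 < PySem.Str.len line - PySem.Str.len (PySem.Str.lstrip line) ∧
          (mi.getD 0 = 0 ∨ PySem.Str.len line - PySem.Str.len (PySem.Str.lstrip line) < mi.getD 0) then
         PySem.Str.len line - PySem.Str.len (PySem.Str.lstrip line)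
       else mi.getD 0
     else mi.getD 0) = (pvMinA mi line).getD 0 ∧
    (∀ v, pvMinA mi line = some v → 0 < v) := by
  by_cases hs : PySem.Str.lstrip line = ""
  · have hss : PySem.Str.strip line = "" := (strip_empty_iff line).mpr hs
    rw [pvMinA.eq_def, if_pos hss, if_neg (by simp [hs])]
    exact ⟨rfl, hmi⟩
  · have hss : ¬ PySem.Str.strip line = "" := fun h => hs ((strip_empty_iff line).mp h)
    rw [pvMinA.eq_def, if_neg hss, if_pos hs]
    set sp := PySem.Str.len line - PySem.Str.len (PySem.Str.lstrip line) with hsp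
    cases mi with
    | none =>
        simp only [Option.getD_none]
        by_cases h0 : 0 < sp
        · rw [if_pos h0, if_pos ⟨h0, by simp⟩]
          exact ⟨rfl, fun v h => by injection h with h; omega⟩
        · rw [if_neg h0, if_neg (fun h => h0 h.1)]
          exact ⟨rfl, fun v h => by cases h⟩
    | some m =>
        have hm := hmi m rfl
        simp only [Option.getD_some]
        by_cases h0 : 0 < sp
        · by_cases hlt : sp < m
          · rw [if_pos h0, if_pos hlt, if_pos ⟨h0, Or.inr hlt⟩]
            exact ⟨rfl, fun v h => by injection h with h; omega⟩
          · rw [if_pos h0, if_neg hlt, if_neg (by rintro ⟨-, h2 | h2⟩ <;> omega)]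
            exact ⟨rfl, fun v h => by injection h with h; omega⟩
        · rw [if_neg h0, if_neg (fun h => h0 h.1)]
          exact ⟨rfl, fun v h => by injection h with h; omega⟩

-- B's fused loop = A's find-File phase, else A's min-indent fold, for any related accumulators
lemma pvB_eq : ∀ (lines : List String) (mi : Option Int), (∀ v, mi = some v → 0 < v) →
    pvB lines (mi.getD 0) =
      match pvFileA lines with
      | some s => s
      | none => pvFinish (lines.foldl pvMinA mi)
  | [], mi, hmi => by
      cases mi with
      | none => rfl
      | some v =>
          have hv := hmi v rfl
          simp only [pvB, pvFileA, pvFinish, Option.getD_some, List.foldl_nil]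
          rw [if_neg (by omega), if_neg (by omega)]
  | line :: rest, mi, hmi => by
      simp only [pvB, pvFileA, List.foldl_cons]
      by_cases hF : PySem.Str.startswith (PySem.Str.lstrip line) "File \"" = true
      · rw [if_pos hF, if_pos hF]
      · rw [if_neg hF, if_neg hF, (pvStep mi hmi line).1]
        exact pvB_eq rest (pvMinA mi line) (pvStep mi hmi line).2

-- ===== VERDICT (by name: the statement is the Claim_ definition above) =====
theorem detect_indent_py_spec : Claim_equal_detect_indent_py := by
  intro lines _
  unfold Spec_detect_indent_py detect_indent_py detect_indent_py_alt
  have h := pvB_eq lines none (by intro v h; cases h)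
  simp only [Option.getD_none] at h
  rw [h]
  cases hf : pvFileA lines <;> simp [pvFinish]
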